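-- pv_equiv track=rewrite | github.com/Kaensy/Lab-Python | lab_3/lab3_test.py | secventa_proprietatea_14
-- ===== SOURCE A (Python) =====
-- def verificare_vectori_char(a,b):
--     # Functia verifica daca elementele a si b au cel putin 2 cifre distincte comune
--     # input     : integer a , b
--     # output    : True - daca au cel putin 2 cifre distincte comune
--     #           : False - daca nu au cel putin 2 cifre distincte comune
--     c_a = [0, 0, 0, 0, 0, 0, 0, 0, 0, 0] # vectorul caracteristic al nr a
--     c_b = [0, 0, 0, 0, 0, 0, 0, 0, 0, 0] # vectorul caracteristic al nr b
--     if a<0: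
--         a=int(a*-1)
--     if b<0:
--         b=int(b*-1)
--     while a > 0:
--         c_a[int(a%10)] = 1
--         a = int(a/10)
--     while b > 0:
--         c_b[int(b%10)] = 1
--         b = int(b/10)
--     nr_cifre_comune=0
--     for el in range(0,9):
--         if c_a[el]==1 and c_b[el]==1:
--             nr_cifre_comune=nr_cifre_comune+1
--     if nr_cifre_comune>1:
--         return True
--     return False
--
-- def secventa_proprietatea_14(lista):
--     # Functia primeste o lista si returneaza cea mai mare secventa(lista) cu proprietatea p
--     # input     : list lista
--     # output    : list secventa
--     lungime_lista=int(len(lista))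
--     lungime_secventa_max = 0
--     index_stang_salvat = 0
--     index_drept_salvat = 0
--     for i in range(lungime_lista - 1):
--         lungime_secventa = 0
--         index_stang = i
--         index_drept = i + 1
--         while verificare_vectori_char(int(lista[index_stang]),int(lista[index_drept])) and index_drept < lungime_lista - 1:
--             index_stang = index_stang + 1
--             index_drept = index_drept + 1
--             lungime_secventa = lungime_secventa + 1
--         if verificare_vectori_char(int(lista[index_stang]), int(lista[index_drept])):
--             index_stang = index_stang + 1
--             index_drept = index_drept + 1
--             lungime_secventa = lungime_secventa + 1
--         if lungime_secventa > lungime_secventa_max: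
--             lungime_secventa_max = lungime_secventa
--             index_stang_salvat = i
--             index_drept_salvat = index_drept
--     if lungime_secventa_max > 0:
--         return lista[index_stang_salvat:index_drept_salvat]
--     else:
--         return []
-- ===== SOURCE B (Python) =====
-- def secventa_proprietatea_14(lista):
--     # Longest run of adjacent pairs sharing >=2 common digits (digits 0-8, per A's rule).
--     # Precompute pair validity once, one backward DP pass for streak lengths, one first-max scan.
--     n = len(lista)
--
--     def _digits(x):
--         m = abs(x)
--         digs = set()
--         while m:
--             digs.add(m % 10)
--             m //= 10
--         return digs
--
--     def _ok(a, b):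
--         da = _digits(a)
--         db = _digits(b)
--         # only digits 0-8 are counted (A's rule)
--         return sum(1 for d in range(9) if d in da and d in db) >= 2
--
--     ok = [_ok(lista[j], lista[j + 1]) for j in range(n - 1)]
--     # runs[j] = number of consecutive valid pairs starting at pair index j
--     runs = []
--     run = 0
--     for j in range(n - 2, -1, -1):
--         run = run + 1 if ok[j] else 0
--         runs.append(run)
--     runs.reverse()
--     best = 0
--     start = 0
--     for j, r in enumerate(runs):
--         if r > best:
--             best = r
--             start = j
--     return lista[start:start + best + 1] if best else []
-- ===== Notes on version B (the rewrite author's own statement) =====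
-- stated objective: faster
-- what changed: Replaces A's per-start rescans (an inner while loop recomputing each streak from scratch) with one precomputed pair-validity list, a single backward DP pass giving every streak length, and one first-max scan.
import Mathlib
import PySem

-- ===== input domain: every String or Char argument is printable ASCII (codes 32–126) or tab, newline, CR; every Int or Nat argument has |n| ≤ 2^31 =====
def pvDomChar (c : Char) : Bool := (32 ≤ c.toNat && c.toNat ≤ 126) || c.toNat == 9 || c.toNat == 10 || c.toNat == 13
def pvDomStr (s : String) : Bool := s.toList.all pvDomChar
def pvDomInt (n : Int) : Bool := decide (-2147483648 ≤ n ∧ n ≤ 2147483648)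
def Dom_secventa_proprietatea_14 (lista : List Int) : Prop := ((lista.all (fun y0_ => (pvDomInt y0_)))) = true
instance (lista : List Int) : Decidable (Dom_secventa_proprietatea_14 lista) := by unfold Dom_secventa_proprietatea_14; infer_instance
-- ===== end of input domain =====

-- B replaces A's per-start inner-while rescans by one precomputed pair-validity list,
-- a backward DP pass for streak lengths and a single first-max scan (fewer pair checks on long runs).
-- ===== PORT A =====
-- the two identical digit-marking while loops of verificare_vectori_char
-- (a is nonnegative when the loop runs; int(a/10) is truncating division, a%10 Python mod)
def pvCharVec (a : Int) (c : List Int) : List Int :=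
  if h : 0 < a then
    pvCharVec (PySem.Int.truncdiv a 10) (PySem.List.pySetD c (PySem.Int.mod a 10) 1)
  else c
termination_by a.toNat
decreasing_by
  have : PySem.Int.truncdiv a 10 = a / 10 := Int.tdiv_eq_ediv_of_nonneg (le_of_lt h)
  rw [this]; omega

def verificare_vectori_char (a b : Int) : Bool :=
  let a1 := if a < 0 then a * (-1) else a
  let b1 := if b < 0 then b * (-1) else b
  let c_a := pvCharVec a1 (List.replicate 10 0)
  let c_b := pvCharVec b1 (List.replicate 10 0)
  let nr : Int := (PySem.List.pyRange 0 9 1).foldl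
    (fun nr el =>
      if PySem.List.pyGetD c_a el 0 == 1 && PySem.List.pyGetD c_b el 0 == 1 then nr + 1 else nr) 0
  decide (1 < nr)

-- the inner while loop of secventa_proprietatea_14 (int(lista[i]) is the identity on Int)
def pvWhileA (lista : List Int) (n stang drept lung : Int) : Int × Int × Int :=
  if h : verificare_vectori_char (PySem.List.pyGetD lista stang 0) (PySem.List.pyGetD lista drept 0) = true ∧ drept < n - 1 then
    pvWhileA lista n (stang + 1) (drept + 1) (lung + 1)
  else (stang, drept, lung)
termination_by (n - 1 - drept).toNat
decreasing_by omega

def secventa_proprietatea_14 (lista : List Int) : List Int :=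
  let n : Int := PySem.List.len lista
  let st := (PySem.List.pyRange 0 (n - 1) 1).foldl
    (fun (s : Int × Int × Int) i =>
      let w := pvWhileA lista n i (i + 1) 0
      let w2 := if verificare_vectori_char (PySem.List.pyGetD lista w.1 0) (PySem.List.pyGetD lista w.2.1 0) then
          (w.1 + 1, w.2.1 + 1, w.2.2 + 1) else w
      if w2.2.2 > s.1 then (w2.2.2, i, w2.2.1) else s) (0, 0, 0)
  if st.1 > 0 then PySem.List.slice lista (some st.2.1) (some st.2.2) else []

-- ===== PORT B =====
-- the digit-collecting while loop of _digits (m = abs(x) is nonnegative, so "while m" is 0 < m)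
def pvDigits (m : Int) (digs : PySem.Set Int) : PySem.Set Int :=
  if h : 0 < m then pvDigits (PySem.Int.floordiv m 10) (PySem.Set.add digs (PySem.Int.mod m 10)) else digs
termination_by m.toNat
decreasing_by
  have : PySem.Int.floordiv m 10 = m / 10 := PySem.Int.floordiv_eq_ediv_of_pos (by omega)
  rw [this]; omega

def pvOkPair (a b : Int) : Bool :=
  let da := pvDigits |a| PySem.Set.empty
  let db := pvDigits |b| PySem.Set.empty
  decide (2 ≤ (PySem.List.pyRange 0 9 1).foldl
    (fun acc d => if PySem.Set.contains da d && PySem.Set.contains db d then acc + 1 else acc) (0 : Int))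

def secventa_proprietatea_14_alt (lista : List Int) : List Int :=
  let n : Int := PySem.List.len lista
  let ok := (PySem.List.pyRange 0 (n - 1) 1).map
    (fun j => pvOkPair (PySem.List.pyGetD lista j 0) (PySem.List.pyGetD lista (j + 1) 0))
  let rr := (PySem.List.pyRange (n - 2) (-1) (-1)).foldl
    (fun (s : Int × List Int) j =>
      let run : Int := if PySem.List.pyGetD ok j false then s.1 + 1 else 0
      (run, s.2 ++ [run])) (0, [])
  let runs := rr.2.reverse
  let bs := (PySem.List.enumerate runs).foldl
    (fun (s : Int × Int) p => if p.2 > s.1 then (p.2, p.1) else s) (0, 0)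
  if bs.1 > 0 then PySem.List.slice lista (some bs.2) (some (bs.2 + bs.1 + 1)) else []

-- ===== PRECONDITION & SPEC =====

-- ===== CLAIM (what is proved, stated in full; the proofs are below) =====

-- ===== LEMMAS AND PROOFS =====

-- ===== PRECONDITION & SPEC =====
def Spec_secventa_proprietatea_14 (lista : List Int) (out : List Int) : Prop := out = secventa_proprietatea_14_alt lista
instance (lista : List Int) (out : List Int) : Decidable (Spec_secventa_proprietatea_14 lista out) := by unfold Spec_secventa_proprietatea_14; infer_instance

-- ===== CLAIM (what is proved, stated in full; the proofs are below) =====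
def Claim_equal_secventa_proprietatea_14 : Prop := ∀ (lista : List Int), Dom_secventa_proprietatea_14 lista → Spec_secventa_proprietatea_14 lista (secventa_proprietatea_14 lista)

-- ===== LEMMAS AND PROOFS =====

-- digit d occurs in the decimal expansion of m
def hasDig (m d : Nat) : Bool :=
  if m = 0 then false else (m % 10 == d) || hasDig (m / 10) d
decreasing_by exact Nat.div_lt_self (by omega) (by omega)

-- length of the streak of true values of f starting at j, looking only at indices < M
def runlen (f : Nat → Bool) (M j : Nat) : Nat :=
  if j < M ∧ f j then runlen f M (j + 1) + 1 else 0
termination_by M - j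
decreasing_by omega

-- pair validity at pair index j of lista
def okf (lista : List Int) (j : Nat) : Bool :=
  pvOkPair (lista.getD j 0) (lista.getD (j + 1) 0)

def runlenInt (lista : List Int) (i : Int) : Int :=
  ((runlen (okf lista) (lista.length - 1) i.toNat : Nat) : Int)

theorem pvCharVec_getD (a : Int) (c : List Int) (d : Nat) (ha : 0 ≤ a) (hc : c.length = 10) (hd : d < 10) :
    PySem.List.pyGetD (pvCharVec a c) (d : Int) 0 = if hasDig a.toNat d then 1 else PySem.List.pyGetD c (d : Int) 0 := by
  induction a, c using pvCharVec.induct with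
  | case1 a c h ih =>
    rw [pvCharVec]
    simp only [h, dite_true]
    have ha10 : PySem.Int.truncdiv a 10 = ((a.toNat / 10 : Nat) : Int) := by
      have : PySem.Int.truncdiv a 10 = a / 10 := Int.tdiv_eq_ediv_of_nonneg (le_of_lt h)
      rw [this]; omega
    have hm10 : PySem.Int.mod a 10 = ((a.toNat % 10 : Nat) : Int) := by
      nth_rewrite 1 [show a = ((a.toNat : Nat) : Int) by omega]
      exact_mod_cast PySem.Int.mod_natCast a.toNat 10
    rw [ha10, hm10] at ih ⊢
    rw [PySem.List.pySetD_natCast] at ih ⊢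
    have hlen : (c.set (a.toNat % 10) 1).length = 10 := by simp [hc]
    rw [Int.toNat_natCast] at ih
    rw [ih (by positivity) hlen]
    have hset := PySem.List.pyGetD_pySetD_natCast c (a.toNat % 10) d (1:Int) (0:Int) (by omega)
    rw [PySem.List.pySetD_natCast] at hset
    have hdig : hasDig a.toNat d = ((a.toNat % 10 == d) || hasDig (a.toNat / 10) d) := by
      rw [hasDig]; simp [show ¬ (a.toNat = 0) by omega]
    rw [hdig, hset]
    by_cases h1 : hasDig (a.toNat / 10) d = true <;> by_cases h2 : d = a.toNat % 10 <;>
      simp [h1, h2]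
    intro hh; exact absurd hh.symm h2
  | case2 a c h =>
    rw [pvCharVec]
    simp only [h, dite_false]
    have : a.toNat = 0 := by omega
    rw [this, hasDig]; simp
theorem pvDigits_mem (m : Int) (s : PySem.Set Int) (d : Nat) (hm : 0 ≤ m) :
    ((d : Int) ∈ pvDigits m s) ↔ (d : Int) ∈ s ∨ hasDig m.toNat d = true := by
  induction m, s using pvDigits.induct with
  | case1 m s h ih =>
    rw [pvDigits]
    simp only [h, dite_true]
    have hf : PySem.Int.floordiv m 10 = ((m.toNat / 10 : Nat) : Int) := by
      rw [PySem.Int.floordiv_eq_ediv_of_pos (by omega)]; omega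
    have hmod : PySem.Int.mod m 10 = ((m.toNat % 10 : Nat) : Int) := by
      nth_rewrite 1 [show m = ((m.toNat : Nat) : Int) by omega]
      exact_mod_cast PySem.Int.mod_natCast m.toNat 10
    rw [hf, hmod] at ih ⊢
    rw [ih (by positivity)]
    rw [PySem.Set.mem_add, Int.toNat_natCast]
    have hdig : hasDig m.toNat d = ((m.toNat % 10 == d) || hasDig (m.toNat / 10) d) := by
      rw [hasDig]; simp [show ¬ (m.toNat = 0) by omega]
    rw [hdig]
    have hcast : ((d : Int) = ((m.toNat % 10 : Nat) : Int)) ↔ m.toNat % 10 = d := by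
      constructor
      · intro hh; exact_mod_cast hh.symm
      · intro hh; exact_mod_cast hh.symm
    simp only [Bool.or_eq_true, beq_iff_eq, hcast]
    tauto
  | case2 m s h =>
    rw [pvDigits]
    simp only [h, dite_false]
    rw [show m.toNat = 0 by omega, hasDig]; simp
theorem pred_eq (a b : Int) : verificare_vectori_char a b = pvOkPair a b := by
  unfold verificare_vectori_char pvOkPair
  have habs : ∀ x : Int, (if x < 0 then x * (-1) else x) = |x| := by
    intro x
    by_cases h : x < 0
    · simp only [h, if_true]; rw [abs_of_neg h]; ring
    · simp only [h, if_false]; rw [abs_of_nonneg (by omega)]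
  simp only [habs]
  have hfold : ∀ x y : Int,
      (PySem.List.pyRange 0 9 1).foldl
        (fun nr el => if PySem.List.pyGetD (pvCharVec |x| (List.replicate 10 0)) el 0 == 1 &&
            PySem.List.pyGetD (pvCharVec |y| (List.replicate 10 0)) el 0 == 1 then nr + 1 else nr) (0:Int)
      = (PySem.List.pyRange 0 9 1).foldl
        (fun acc d => if PySem.Set.contains (pvDigits |x| PySem.Set.empty) d &&
            PySem.Set.contains (pvDigits |y| PySem.Set.empty) d then acc + 1 else acc) (0:Int) := by
    intro x y
    apply PySem.List.foldl_congr_mem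
    intro acc el hel
    have hb := (PySem.List.mem_pyRange_one).mp hel
    have hcond : ∀ z : Int,
        (PySem.List.pyGetD (pvCharVec |z| (List.replicate 10 0)) el 0 == 1)
        = PySem.Set.contains (pvDigits |z| PySem.Set.empty) el := by
      intro z
      have hk : el = ((el.toNat : Nat) : Int) := by omega
      rw [hk]
      rw [pvCharVec_getD |z| _ el.toNat (abs_nonneg z) (by simp) (by omega)]
      have hmem : (((el.toNat : Nat) : Int) ∈ pvDigits |z| PySem.Set.empty) ↔ hasDig |z|.toNat el.toNat = true := by
        rw [pvDigits_mem _ _ _ (abs_nonneg z)]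
        simp [PySem.Set.empty]
      have hrepl : PySem.List.pyGetD (List.replicate 10 (0:Int)) ((el.toNat : Nat) : Int) 0 = 0 := by
        rw [PySem.List.pyGetD_natCast]
        simp only [List.getD_eq_getElem?_getD, List.getElem?_replicate]
        simp [show el.toNat < 10 by omega]
      rw [hrepl]
      have hc : PySem.Set.contains (pvDigits |z| PySem.Set.empty) ((el.toNat : Nat) : Int)
          = hasDig |z|.toNat el.toNat := by
        by_cases hh : hasDig |z|.toNat el.toNat = true
        · rw [hh]; exact List.contains_iff_mem.mpr (hmem.mpr hh)
        · have h2 : ¬ (((el.toNat : Nat) : Int) ∈ pvDigits |z| PySem.Set.empty) :=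
            fun hm2 => hh (hmem.mp hm2)
          rw [Bool.not_eq_true] at hh
          rw [hh]
          exact Bool.eq_false_iff.mpr (fun hcon => h2 (List.contains_iff_mem.mp hcon))
      rw [hc]
      by_cases hh : hasDig |z|.toNat el.toNat = true <;> simp [hh]
    rw [hcond x, hcond y]
  rw [hfold]
  exact decide_eq_decide.mpr (by omega)
theorem guard_eq (lista : List Int) (stang : Int) (h1 : 0 ≤ stang) :
    verificare_vectori_char (PySem.List.pyGetD lista stang 0) (PySem.List.pyGetD lista (stang + 1) 0)
      = okf lista stang.toNat := by
  rw [pred_eq, okf]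
  congr 1
  · nth_rewrite 1 [show stang = ((stang.toNat : Nat) : Int) by omega]
    rw [PySem.List.pyGetD_natCast]
  · nth_rewrite 1 [show stang + 1 = ((stang.toNat + 1 : Nat) : Int) by omega]
    rw [PySem.List.pyGetD_natCast]

theorem stopA (lista : List Int) (stang drept lung : Int)
    (h1 : 0 ≤ stang) (h2 : drept = stang + 1) (h3 : drept ≤ (lista.length : Int) - 1)
    (hstop : ¬(verificare_vectori_char (PySem.List.pyGetD lista stang 0) (PySem.List.pyGetD lista drept 0) = true ∧ drept < (lista.length : Int) - 1)) :
    (if verificare_vectori_char (PySem.List.pyGetD lista stang 0) (PySem.List.pyGetD lista drept 0) then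
      (stang + 1, drept + 1, lung + 1) else (stang, drept, lung))
    = (stang + runlenInt lista stang, drept + runlenInt lista stang, lung + runlenInt lista stang) := by
  subst h2
  rw [guard_eq lista stang h1]
  by_cases hg : okf lista stang.toNat = true
  · have hdr : ¬ (stang + 1 < (lista.length : Int) - 1) := fun hlt => hstop ⟨by rw [guard_eq lista stang h1]; exact hg, hlt⟩
    have hR : runlenInt lista stang = 1 := by
      unfold runlenInt
      rw [runlen]
      have hlt : stang.toNat < lista.length - 1 := by omega
      simp only [hlt, hg, and_true, if_true]
      rw [runlen]
      have : ¬ (stang.toNat + 1 < lista.length - 1) := by omega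
      simp [this]
    rw [hR, hg]; simp
  · have hR : runlenInt lista stang = 0 := by
      unfold runlenInt
      rw [runlen]
      simp [hg]
    rw [hR]
    rw [Bool.not_eq_true] at hg
    rw [hg]; simp
theorem combinedA (lista : List Int) (stang drept lung : Int)
    (h1 : 0 ≤ stang) (h2 : drept = stang + 1) (h3 : drept ≤ (lista.length : Int) - 1) :
    (let w := pvWhileA lista (lista.length : Int) stang drept lung
     if verificare_vectori_char (PySem.List.pyGetD lista w.1 0) (PySem.List.pyGetD lista w.2.1 0) then
       (w.1 + 1, w.2.1 + 1, w.2.2 + 1) else w)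
    = (stang + runlenInt lista stang, drept + runlenInt lista stang, lung + runlenInt lista stang) := by
  generalize hk : ((lista.length : Int) - 1 - drept).toNat = k
  induction k generalizing stang drept lung with
  | zero =>
    have hnd : ¬ (drept < (lista.length : Int) - 1) := by omega
    rw [pvWhileA, dif_neg (fun hc => hnd hc.2)]
    exact stopA lista stang drept lung h1 h2 h3 (fun hc => hnd hc.2)
  | succ k ih =>
    rw [pvWhileA]
    by_cases hcond : verificare_vectori_char (PySem.List.pyGetD lista stang 0) (PySem.List.pyGetD lista drept 0) = true ∧ drept < (lista.length : Int) - 1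
    · rw [dif_pos hcond]
      have ih2 := ih (stang + 1) (drept + 1) (lung + 1) (by omega) (by omega) (by omega) (by omega)
      simp only at ih2 ⊢
      rw [ih2]
      have hR : runlenInt lista stang = runlenInt lista (stang + 1) + 1 := by
        unfold runlenInt
        rw [runlen]
        have hg : okf lista stang.toNat = true := by
          rw [← guard_eq lista stang h1, ← h2]; exact hcond.1
        have hlt : stang.toNat < lista.length - 1 := by omega
        simp only [hlt, hg, and_self, if_true]
        have : (stang + 1).toNat = stang.toNat + 1 := by omega
        rw [this]
        push_cast
        ring
      rw [hR]
      refine Prod.ext (by ring) (Prod.ext (by ring) (by ring))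
    · rw [dif_neg hcond]
      exact stopA lista stang drept lung h1 h2 h3 hcond
theorem foldFinal (lista : List Int) (l : List Int) (m ls rs b st : Int)
    (e1 : m = b) (e2 : ls = st) (e3 : 0 ≤ m) (e4 : 0 < m → rs = st + m + 1) :
    (l.foldl (fun (s : Int × Int × Int) i =>
        if runlenInt lista i > s.1 then (runlenInt lista i, i, i + 1 + runlenInt lista i) else s) (m, ls, rs)).1
      = (l.foldl (fun (s : Int × Int) j =>
        if runlenInt lista j > s.1 then (runlenInt lista j, j) else s) (b, st)).1
    ∧ (l.foldl (fun (s : Int × Int × Int) i =>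
        if runlenInt lista i > s.1 then (runlenInt lista i, i, i + 1 + runlenInt lista i) else s) (m, ls, rs)).2.1
      = (l.foldl (fun (s : Int × Int) j =>
        if runlenInt lista j > s.1 then (runlenInt lista j, j) else s) (b, st)).2
    ∧ 0 ≤ (l.foldl (fun (s : Int × Int × Int) i =>
        if runlenInt lista i > s.1 then (runlenInt lista i, i, i + 1 + runlenInt lista i) else s) (m, ls, rs)).1
    ∧ (0 < (l.foldl (fun (s : Int × Int × Int) i =>
        if runlenInt lista i > s.1 then (runlenInt lista i, i, i + 1 + runlenInt lista i) else s) (m, ls, rs)).1 →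
        (l.foldl (fun (s : Int × Int × Int) i =>
        if runlenInt lista i > s.1 then (runlenInt lista i, i, i + 1 + runlenInt lista i) else s) (m, ls, rs)).2.2
        = (l.foldl (fun (s : Int × Int) j =>
        if runlenInt lista j > s.1 then (runlenInt lista j, j) else s) (b, st)).2
          + (l.foldl (fun (s : Int × Int × Int) i =>
        if runlenInt lista i > s.1 then (runlenInt lista i, i, i + 1 + runlenInt lista i) else s) (m, ls, rs)).1 + 1) := by
  induction l generalizing m ls rs b st with
  | nil => exact ⟨e1, e2, e3, e4⟩
  | cons x xs ih =>
    simp only [List.foldl_cons]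
    by_cases hx : runlenInt lista x > m
    · rw [if_pos hx, if_pos (e1 ▸ hx)]
      exact ih _ _ _ _ _ rfl rfl (by omega) (fun _ => by ring)
    · rw [if_neg hx, if_neg (e1 ▸ hx)]
      exact ih _ _ _ _ _ e1 e2 e3 e4
theorem okB_eq (lista : List Int) (j : Int) (hj : 0 ≤ j) :
    pvOkPair (PySem.List.pyGetD lista j 0) (PySem.List.pyGetD lista (j + 1) 0) = okf lista j.toNat := by
  rw [okf]
  congr 1
  · nth_rewrite 1 [show j = ((j.toNat : Nat) : Int) by omega]
    rw [PySem.List.pyGetD_natCast]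
  · nth_rewrite 1 [show j + 1 = ((j.toNat + 1 : Nat) : Int) by omega]
    rw [PySem.List.pyGetD_natCast]

theorem runlenInt_step (lista : List Int) (j : Int) (hj0 : 0 ≤ j) (hj : j ≤ (lista.length : Int) - 2) :
    runlenInt lista j = if okf lista j.toNat then runlenInt lista (j + 1) + 1 else 0 := by
  unfold runlenInt
  rw [runlen]
  have hlt : j.toNat < lista.length - 1 := by omega
  have hj1 : (j + 1).toNat = j.toNat + 1 := by omega
  rw [hj1]
  by_cases hg : okf lista j.toNat = true <;> simp [hg, hlt]

theorem foldRuns (lista : List Int) (j : Int) (acc : List Int)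
    (hj : j ≤ (lista.length : Int) - 2) (hj2 : -1 ≤ j) :
    (PySem.List.pyRange j (-1) (-1)).foldl
      (fun (s : Int × List Int) t =>
        let run : Int := if PySem.List.pyGetD ((PySem.List.pyRange 0 ((lista.length : Int) - 1) 1).map
            (fun j2 => pvOkPair (PySem.List.pyGetD lista j2 0) (PySem.List.pyGetD lista (j2 + 1) 0))) t false
          then s.1 + 1 else 0
        (run, s.2 ++ [run])) (runlenInt lista (j + 1), acc)
    = (runlenInt lista 0, acc ++ (PySem.List.pyRange j (-1) (-1)).map (fun t => runlenInt lista t)) := by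
  generalize hk : (j + 1).toNat = k
  induction k generalizing j acc with
  | zero =>
    have hj1 : j = -1 := by omega
    subst hj1
    rw [PySem.List.pyRange_neg_one_eq_nil (by omega)]
    simp
  | succ k ih =>
    have hj0 : 0 ≤ j := by omega
    rw [PySem.List.pyRange_neg_one_cons (by omega : (-1:Int) < j)]
    simp only [List.foldl_cons, List.map_cons]
    have hget : PySem.List.pyGetD ((PySem.List.pyRange 0 ((lista.length : Int) - 1) 1).map
        (fun j2 => pvOkPair (PySem.List.pyGetD lista j2 0) (PySem.List.pyGetD lista (j2 + 1) 0))) j false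
        = okf lista j.toNat := by
      rw [PySem.List.pyGetD_map_pyRange_of_nonneg _ _ _ _ hj0 (by omega)]
      exact okB_eq lista j hj0
    simp only [hget]
    have hrun : (if okf lista j.toNat then runlenInt lista (j + 1) + 1 else 0) = runlenInt lista j :=
      (runlenInt_step lista j hj0 hj).symm
    rw [hrun]
    have ihj := ih (j - 1) (acc ++ [runlenInt lista j]) (by omega) (by omega) (by omega)
    rw [show j - 1 + 1 = j by ring] at ihj
    rw [ihj]
    simp
theorem stepA_eq (lista : List Int) (s : Int × Int × Int) (i : Int)
    (h0 : 0 ≤ i) (h1 : i < (lista.length : Int) - 1) :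
    (let w := pvWhileA lista (lista.length : Int) i (i + 1) 0
     let w2 := if verificare_vectori_char (PySem.List.pyGetD lista w.1 0) (PySem.List.pyGetD lista w.2.1 0) then
        (w.1 + 1, w.2.1 + 1, w.2.2 + 1) else w
     if w2.2.2 > s.1 then (w2.2.2, i, w2.2.1) else s)
    = if runlenInt lista i > s.1 then (runlenInt lista i, i, i + 1 + runlenInt lista i) else s := by
  have hc := combinedA lista i (i + 1) 0 h0 rfl (by omega)
  simp only at hc ⊢
  rw [hc]
  simp only [zero_add]
theorem runlenInt_last (lista : List Int) (i : Int) (hi : (lista.length : Int) - 1 ≤ i) :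
    runlenInt lista i = 0 := by
  unfold runlenInt
  rw [runlen]
  simp [show ¬ (i.toNat < lista.length - 1 ∧ okf lista i.toNat = true) from fun hc => by omega]

theorem main_eq (lista : List Int) : secventa_proprietatea_14 lista = secventa_proprietatea_14_alt lista := by
  unfold secventa_proprietatea_14 secventa_proprietatea_14_alt
  rw [PySem.List.len_eq]
  simp only []
  by_cases hn : (lista.length : Int) - 1 ≤ 0
  · simp only [PySem.List.pyRange_one_eq_nil hn,
      PySem.List.pyRange_neg_one_eq_nil (by omega : (lista.length : Int) - 2 ≤ -1)]
    simp
  · have hL : 2 ≤ (lista.length : Int) := by omega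
    -- A side: rewrite the outer fold stepwise with stepA_eq
    have hA : (PySem.List.pyRange 0 ((lista.length : Int) - 1) 1).foldl
        (fun (s : Int × Int × Int) i =>
          let w := pvWhileA lista (lista.length : Int) i (i + 1) 0
          let w2 := if verificare_vectori_char (PySem.List.pyGetD lista w.1 0) (PySem.List.pyGetD lista w.2.1 0) then
              (w.1 + 1, w.2.1 + 1, w.2.2 + 1) else w
          if w2.2.2 > s.1 then (w2.2.2, i, w2.2.1) else s) (0, 0, 0)
      = (PySem.List.pyRange 0 ((lista.length : Int) - 1) 1).foldl
        (fun (s : Int × Int × Int) i =>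
          if runlenInt lista i > s.1 then (runlenInt lista i, i, i + 1 + runlenInt lista i) else s) (0, 0, 0) := by
      apply PySem.List.foldl_congr_mem
      intro acc i hi
      have hb := (PySem.List.mem_pyRange_one).mp hi
      exact stepA_eq lista acc i hb.1 hb.2
    rw [hA]
    have hrr := foldRuns lista ((lista.length : Int) - 2) [] (by omega) (by omega)
    rw [show (lista.length : Int) - 2 + 1 = (lista.length : Int) - 1 by ring] at hrr
    rw [runlenInt_last lista ((lista.length : Int) - 1) (le_refl _)] at hrr
    simp only [] at hrr
    rw [hrr]
    have hre : PySem.List.pyRange ((lista.length : Int) - 2) (-1) (-1)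
        = (PySem.List.pyRange 0 ((lista.length : Int) - 1) 1).reverse := by
      rw [PySem.List.pyRange_neg_one_eq_reverse,
        show (lista.length : Int) - 2 + 1 = (lista.length : Int) - 1 by ring,
        show (-1 : Int) + 1 = 0 by ring]
    rw [List.nil_append, hre, ← List.map_reverse, List.reverse_reverse]
    rw [PySem.List.enumerate_eq_map_pyRange _ (0 : Int)]
    have hlen : PySem.List.len ((PySem.List.pyRange 0 ((lista.length : Int) - 1) 1).map
        (fun t => runlenInt lista t)) = (lista.length : Int) - 1 := by
      simp [PySem.List.len_eq, PySem.List.length_pyRange_one]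
      omega
    rw [hlen]
    rw [List.foldl_map]
    have hBc : (PySem.List.pyRange 0 ((lista.length : Int) - 1) 1).foldl
        (fun (s : Int × Int) j =>
          if (j, PySem.List.pyGetD ((PySem.List.pyRange 0 ((lista.length : Int) - 1) 1).map
              (fun t => runlenInt lista t)) j 0).2 > s.1 then
            ((j, PySem.List.pyGetD ((PySem.List.pyRange 0 ((lista.length : Int) - 1) 1).map
              (fun t => runlenInt lista t)) j 0).2,
             (j, PySem.List.pyGetD ((PySem.List.pyRange 0 ((lista.length : Int) - 1) 1).map
              (fun t => runlenInt lista t)) j 0).1) else s) (0, 0)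
      = (PySem.List.pyRange 0 ((lista.length : Int) - 1) 1).foldl
        (fun (s : Int × Int) j => if runlenInt lista j > s.1 then (runlenInt lista j, j) else s) (0, 0) := by
      apply PySem.List.foldl_congr_mem
      intro acc j hj
      have hb := (PySem.List.mem_pyRange_one).mp hj
      rw [PySem.List.pyGetD_map_pyRange_of_nonneg _ _ _ _ hb.1 hb.2]
    rw [hBc]
    have hff := foldFinal lista (PySem.List.pyRange 0 ((lista.length : Int) - 1) 1) 0 0 0 0 0
      rfl rfl (le_refl 0) (by omega)
    obtain ⟨f1, f2, f3, f4⟩ := hff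
    by_cases hpos : 0 < ((PySem.List.pyRange 0 ((lista.length : Int) - 1) 1).foldl
        (fun (s : Int × Int × Int) i =>
          if runlenInt lista i > s.1 then (runlenInt lista i, i, i + 1 + runlenInt lista i) else s) (0, 0, 0)).1
    · rw [if_pos (by omega : _ > (0:Int)), if_pos (by rw [← f1]; omega)]
      rw [f4 hpos, f1, f2]
    · rw [if_neg (by omega), if_neg (by rw [← f1]; omega)]

-- ===== VERDICT (by name: the statement is the Claim_ definition above) =====
theorem secventa_proprietatea_14_spec : Claim_equal_secventa_proprietatea_14 := by
  intro lista _
  unfold Spec_secventa_proprietatea_14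
  exact main_eq lista
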